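-- pv_equiv track=rewrite | github.com/planzjd/Scrabble_Scorer | scrabble_scorer.py | vowel_bonus_scorer
-- ===== SOURCE A (Python) =====
-- def vowel_bonus_scorer(word):
--     word = word.upper()
--     score = 0
--
--     for char in word:
--         if char in ['A', 'E', 'I', 'O', 'U']:
--             score += 3
--         else: score +=1
--
--     return score
-- ===== SOURCE B (Python) =====
-- def vowel_bonus_scorer(word):
--     counts = {}
--     for c in word.upper():
--         counts[c] = counts.get(c, 0) + 1
--     return sum(n * (3 if c in 'AEIOU' else 1) for c, n in counts.items())
-- ===== Notes on version B (the rewrite author's own statement) =====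
-- stated objective: alternative
-- what changed: Replaces A's per-character branch-and-accumulate loop with a two-stage histogram algorithm: build a character-frequency dict in one pass, then score once per DISTINCT character (count * value), so the vowel test runs O(distinct) times instead of O(n).
import Mathlib
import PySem

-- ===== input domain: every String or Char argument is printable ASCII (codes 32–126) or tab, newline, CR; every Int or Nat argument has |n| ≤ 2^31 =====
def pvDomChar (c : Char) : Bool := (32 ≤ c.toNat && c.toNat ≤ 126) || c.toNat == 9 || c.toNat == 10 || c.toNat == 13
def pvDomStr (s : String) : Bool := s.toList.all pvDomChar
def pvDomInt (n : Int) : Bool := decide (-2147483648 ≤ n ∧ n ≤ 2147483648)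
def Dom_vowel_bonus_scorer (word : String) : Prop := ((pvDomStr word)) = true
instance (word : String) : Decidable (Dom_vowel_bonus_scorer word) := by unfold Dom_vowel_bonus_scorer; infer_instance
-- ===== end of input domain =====

-- B replaces A's per-character accumulation with a two-stage histogram: build a character
-- frequency dict, then score count * value once per distinct character (alternative decomposition).

-- ===== PORT A =====
-- A: uppercase, then accumulate +3 for vowels, +1 otherwise, over each character.
def vowel_bonus_scorer (word : String) : Int :=
  let w := PySem.Str.upper word
  w.toList.foldl (fun score char =>
    if char ∈ ['A', 'E', 'I', 'O', 'U'] then score + 3 else score + 1) 0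

-- ===== PORT B =====
-- B: build counts = {} ; counts[c] = counts.get(c,0)+1 per char; then sum n * value over items.
def vowel_bonus_scorer_alt (word : String) : Int :=
  let counts : PySem.Dict Char Int :=
    (PySem.Str.upper word).toList.foldl
      (fun d c => d.insert c (d.getD c 0 + 1)) PySem.Dict.empty
  counts.items.foldl
    (fun s p => s + p.2 * (if p.1 ∈ ("AEIOU" : String).toList then 3 else 1)) 0

-- ===== PRECONDITION & SPEC =====
def Spec_vowel_bonus_scorer (word : String) (out : Int) : Prop := out = vowel_bonus_scorer_alt word
instance (word : String) (out : Int) : Decidable (Spec_vowel_bonus_scorer word out) := by unfold Spec_vowel_bonus_scorer; infer_instance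

-- ===== CLAIM (what is proved, stated in full; the proofs are below) =====
def Claim_equal_vowel_bonus_scorer : Prop := ∀ (word : String), Dom_vowel_bonus_scorer word → Spec_vowel_bonus_scorer word (vowel_bonus_scorer word)

-- ===== LEMMAS AND PROOFS =====

-- the per-character value both programs use
def pvWeight (c : Char) : Int := if c ∈ ['A', 'E', 'I', 'O', 'U'] then 3 else 1

-- A's fold is the sum of weights over the characters.
theorem pv_foldA (l : List Char) (s : Int) :
    l.foldl (fun score char =>
      if char ∈ ['A', 'E', 'I', 'O', 'U'] then score + 3 else score + 1) s
      = s + (l.map pvWeight).sum := by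
  induction l generalizing s with
  | nil => simp
  | cons c t ih =>
    simp only [List.foldl_cons, List.map_cons, List.sum_cons, ih, pvWeight]
    by_cases h : c ∈ ['A', 'E', 'I', 'O', 'U'] <;> simp [h] <;> ring

-- B's item fold is the sum of p.2 * weight p.1 over the items.
theorem pv_foldB (l : List (Char × Int)) (s : Int) :
    l.foldl (fun s p => s + p.2 * (if p.1 ∈ ("AEIOU" : String).toList then 3 else 1)) s
      = s + (l.map (fun p => p.2 * pvWeight p.1)).sum := by
  induction l generalizing s with
  | nil => simp
  | cons p t ih =>
    simp only [List.foldl_cons]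
    rw [ih]
    have hs : ("AEIOU" : String).toList = ['A', 'E', 'I', 'O', 'U'] := by decide
    simp only [List.map_cons, List.sum_cons, pvWeight, hs]
    ring

-- summing (if k = c then 1 else 0) * w k over a Nodup list containing c gives w c
theorem pv_sum_indicator (s : List Char) (c : Char) (hnd : s.Nodup) (hc : c ∈ s) :
    (s.map (fun k => (if k = c then (1 : Int) else 0) * pvWeight k)).sum = pvWeight c := by
  induction s with
  | nil => cases hc
  | cons a t ih =>
    rcases List.nodup_cons.mp hnd with ⟨ha, hndt⟩
    rcases List.mem_cons.mp hc with rfl | h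
    · have hzero : (t.map (fun k => (if k = c then (1 : Int) else 0) * pvWeight k)).sum = 0 := by
        apply List.sum_eq_zero
        intro x hx
        rcases List.mem_map.mp hx with ⟨k, hk, rfl⟩
        have hne : k ≠ c := fun e => ha (e ▸ hk)
        simp [hne]
      simp only [List.map_cons, List.sum_cons, hzero, add_zero]
      simp
    · have hne : a ≠ c := fun e => ha (e ▸ h)
      simp only [List.map_cons, List.sum_cons, if_neg hne, zero_mul, zero_add]
      exact ih hndt h

-- summing count * weight over a Nodup superset of l equals summing weight over l
theorem pv_sum_counts (l s : List Char) (hnd : s.Nodup) (hsub : ∀ x ∈ l, x ∈ s) :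
    (s.map (fun k => (l.count k : Int) * pvWeight k)).sum = (l.map pvWeight).sum := by
  induction l with
  | nil => simp
  | cons c t ih =>
    have hct : ∀ x ∈ t, x ∈ s := fun x hx => hsub x (List.mem_cons_of_mem _ hx)
    have hcs : c ∈ s := hsub c (List.mem_cons_self)
    have hsplit : ∀ k : Char, ((c :: t).count k : Int) * pvWeight k
        = (t.count k : Int) * pvWeight k + (if k = c then (1 : Int) else 0) * pvWeight k := by
      intro k
      by_cases h : k = c
      · subst h; simp [List.count_cons_self]; ring
      · rw [if_neg h, zero_mul, add_zero, List.count_cons]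
        simp
        exact Or.inl (fun e => h e.symm)
    calc (s.map (fun k => ((c :: t).count k : Int) * pvWeight k)).sum
        = (s.map (fun k => (t.count k : Int) * pvWeight k
            + (if k = c then (1 : Int) else 0) * pvWeight k)).sum := by
          congr 1; exact List.map_congr_left (fun k _ => hsplit k)
      _ = (s.map (fun k => (t.count k : Int) * pvWeight k)).sum
            + (s.map (fun k => (if k = c then (1 : Int) else 0) * pvWeight k)).sum := by
          rw [← List.sum_map_add]
      _ = (t.map pvWeight).sum + pvWeight c := by
          rw [ih hct, pv_sum_indicator s c hnd hcs]
      _ = ((c :: t).map pvWeight).sum := by simp [List.sum_cons]; ring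

-- ===== VERDICT (by name: the statement is the Claim_ definition above) =====
theorem vowel_bonus_scorer_spec : Claim_equal_vowel_bonus_scorer := by
  intro word _
  unfold Spec_vowel_bonus_scorer vowel_bonus_scorer vowel_bonus_scorer_alt
  rw [PySem.Dict.foldl_insert_getD_add_one_eq_counter]
  rw [pv_foldA, pv_foldB, PySem.Dict.items_counter, List.map_map]
  simp only [Function.comp_def]
  rw [pv_sum_counts (PySem.Str.upper word).toList
    (PySem.Set.ofList (PySem.Str.upper word).toList)
    (PySem.Set.nodup_ofList _) (fun x hx => (PySem.Set.mem_ofList _ _).mpr hx)]
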